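-- pv_equiv track=rewrite | github.com/The-School-of-AI/Arcturus | browser/core/injection_defense.py | _is_suspicious_context
-- ===== SOURCE A (Python) =====
-- def _is_suspicious_context(context: str) -> bool:
--     """Check if context suggests injection"""
--     suspicious_keywords = [
--         'instruction', 'command', 'execute', 'run', 'ignore',
--         'forget', 'bypass', 'override', 'instead', 'instead of',
--     ]
--
--     for keyword in suspicious_keywords:
--         if keyword.lower() in context.lower():
--             return True
--
--     return False
-- ===== SOURCE B (Python) =====
-- _KEYWORDS = frozenset({
--     'instruction', 'command', 'execute', 'run', 'ignore',
--     'forget', 'bypass', 'override', 'instead', 'instead of',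
-- })
-- _LENGTHS = sorted({len(k) for k in _KEYWORDS})
--
--
-- def _is_suspicious_context(context: str) -> bool:
--     """Check if context suggests injection: slide over the lowered text and
--     test each fixed-length window against a hash set of keywords."""
--     text = context.lower()
--     return any(text[i:i + n] in _KEYWORDS
--                for i in range(len(text))
--                for n in _LENGTHS)
-- ===== Notes on version B (the rewrite author's own statement) =====
-- stated objective: alternative
-- what changed: B lowers the text once and tests, at each position, the fixed-length windows (one per distinct keyword length) for membership in a frozenset of keywords, instead of A's one full substring scan (with a fresh lower()) per keyword.
import Mathlib
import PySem

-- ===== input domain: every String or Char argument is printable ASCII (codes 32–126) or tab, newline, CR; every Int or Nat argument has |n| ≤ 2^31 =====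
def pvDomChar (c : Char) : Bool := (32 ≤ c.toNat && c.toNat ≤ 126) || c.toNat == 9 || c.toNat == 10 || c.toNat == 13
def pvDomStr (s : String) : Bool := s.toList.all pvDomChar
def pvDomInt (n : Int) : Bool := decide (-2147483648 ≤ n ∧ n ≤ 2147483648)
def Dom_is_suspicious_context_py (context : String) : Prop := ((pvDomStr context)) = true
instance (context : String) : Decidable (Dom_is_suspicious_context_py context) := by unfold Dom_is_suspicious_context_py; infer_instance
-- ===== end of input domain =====

-- B lowers the text once and tests each fixed-length window (one per distinct keyword
-- length) against a set of keywords, instead of A's one substring scan per keyword.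

-- ===== PORT A =====
def pvKeywordsA : List String :=
  ["instruction", "command", "execute", "run", "ignore",
   "forget", "bypass", "override", "instead", "instead of"]

def is_suspicious_context_py (context : String) : Bool :=
  -- for keyword in suspicious_keywords: if keyword.lower() in context.lower(): return True
  pvKeywordsA.any (fun keyword =>
    PySem.Str.isIn (PySem.Str.lower keyword) (PySem.Str.lower context))

-- ===== PORT B =====
-- _KEYWORDS = frozenset({...}) — only membership is used, so insertion order is irrelevant
def pvKwSet : PySem.Set String :=
  PySem.Set.ofList
    ["instruction", "command", "execute", "run", "ignore",
     "forget", "bypass", "override", "instead", "instead of"]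

-- _LENGTHS = sorted({len(k) for k in _KEYWORDS})
def pvLengths : List Nat := [3, 6, 7, 8, 10, 11]

def is_suspicious_context_py_alt (context : String) : Bool :=
  let text := PySem.Str.lower context
  -- any(text[i:i+n] in _KEYWORDS for i in range(len(text)) for n in _LENGTHS)
  (List.range text.toList.length).any (fun i =>
    pvLengths.any (fun n =>
      PySem.Set.contains pvKwSet
        (String.ofList (PySem.List.slice text.toList (some (i : Int)) (some ((i : Int) + (n : Int)))))))

-- ===== PRECONDITION & SPEC =====
def Spec_is_suspicious_context_py (context : String) (out : Bool) : Prop := out = is_suspicious_context_py_alt context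
instance (context : String) (out : Bool) : Decidable (Spec_is_suspicious_context_py context out) := by unfold Spec_is_suspicious_context_py; infer_instance

-- ===== CLAIM (what is proved, stated in full; the proofs are below) =====
def Claim_equal_is_suspicious_context_py : Prop := ∀ (context : String), Dom_is_suspicious_context_py context → Spec_is_suspicious_context_py context (is_suspicious_context_py context)

-- ===== LEMMAS AND PROOFS =====

-- every keyword is already lowercase
theorem pv_lower_keywords : ∀ k ∈ pvKeywordsA, PySem.Str.lower k = k := by decide

-- set membership = membership in A's keyword list
theorem pv_kwset_mem (s : String) : PySem.Set.contains pvKwSet s = true ↔ s ∈ pvKeywordsA := by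
  unfold pvKwSet
  rw [PySem.Set.contains_iff]
  rw [PySem.Set.mem_ofList]
  rfl

theorem pv_kw_len : ∀ k ∈ pvKeywordsA, k.toList ≠ [] ∧ k.toList.length ∈ pvLengths := by decide

theorem pv_main (context : String) :
    is_suspicious_context_py context = is_suspicious_context_py_alt context := by
  unfold is_suspicious_context_py is_suspicious_context_py_alt
  rw [Bool.eq_iff_iff]
  simp only [List.any_eq_true, List.mem_range]
  constructor
  · rintro ⟨k, hk, hin⟩
    rw [pv_lower_keywords k hk] at hin
    rw [PySem.Str.isIn_iff_infix] at hin
    have hiff := (PySem.Chars.exists_prefix_drop_iff_isIn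
        (s := (PySem.Str.lower context).toList) (sub := k.toList))
    rw [PySem.Chars.isIn_iff_infix] at hiff
    obtain ⟨i, hpre⟩ := hiff.mpr hin
    obtain ⟨hne, hlen⟩ := pv_kw_len k hk
    have hilt : i < (PySem.Str.lower context).toList.length := by
      by_contra h
      rw [List.drop_eq_nil_of_le (Nat.le_of_not_lt h)] at hpre
      exact hne (List.prefix_nil.mp hpre)
    refine ⟨i, hilt, k.toList.length, hlen, ?_⟩
    rw [PySem.List.slice_natCast_add, pv_kwset_mem]
    rw [show (((PySem.Str.lower context).toList.drop i).take k.toList.length) = k.toList from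
      (List.prefix_iff_eq_take.mp hpre).symm]
    rw [String.ofList_toList]
    exact hk
  · rintro ⟨i, _, n, _, hmem⟩
    rw [PySem.List.slice_natCast_add] at hmem
    rw [pv_kwset_mem] at hmem
    set w := (((PySem.Str.lower context).toList.drop i).take n) with hw
    refine ⟨String.ofList w, hmem, ?_⟩
    rw [pv_lower_keywords _ hmem, PySem.Str.isIn_iff_infix]
    have hiff := (PySem.Chars.exists_prefix_drop_iff_isIn
        (s := (PySem.Str.lower context).toList) (sub := (String.ofList w).toList))
    rw [PySem.Chars.isIn_iff_infix] at hiff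
    refine hiff.mp ⟨i, ?_⟩
    rw [String.toList_ofList]
    exact List.take_prefix _ _

-- ===== VERDICT (by name: the statement is the Claim_ definition above) =====
theorem is_suspicious_context_py_spec : Claim_equal_is_suspicious_context_py :=
  fun context _ => pv_main context
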